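-- pv_equiv track=rewrite | github.com/DimaD444/FP | bussines.py | sterge_apartamente_consecutive
-- ===== SOURCE A (Python) =====
-- def validare_numar_apartament(apartament):
--     """
--         Validează dacă numărul apartamentului este un număr întreg.
--
--         :param apartament: Numărul apartamentului de validat.
--         :return: Numărul apartamentului validat.
--         :raises: ValueError dacă numărul nu este un număr întreg.
--         """
--     if not isinstance(apartament, int):
--         raise ValueError("Eroare: Numărul apartamentului trebuie să fie un număr întreg.")
--     return apartament
--
-- def sterge_apartamente_consecutive(apartamente, apartament_start, apartament_end):
--     """
--                 Sterge Apartamente consecutive din dictionar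
--                 :param apartament_start: Numarul primul apartament
--                 :param apartament_end: Numarul al doilea apartament
--                 :param apartamente: Dicționarul care conține datele despre apartamente.
--                 :return: Dicționarul actualizat cu apartamentele sterse.
--
--                 """
--     apartament_start = validare_numar_apartament(apartament_start)
--     apartament_end = validare_numar_apartament(apartament_end)
--     new_apartamente = apartamente.copy()
--
--     for apartament in range(apartament_start, apartament_end + 1):
--         if apartament in new_apartamente:
--             new_apartamente.pop(apartament)
--
--     return new_apartamente
-- ===== SOURCE B (Python) =====
-- def sterge_apartamente_consecutive(apartamente, apartament_start, apartament_end):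
--     # One pass over the dict's items instead of iterating the whole integer range:
--     # keep every entry whose key lies outside [apartament_start, apartament_end].
--     return {k: v for k, v in apartamente.items()
--             if not (apartament_start <= k <= apartament_end)}
-- ===== Notes on version B (the rewrite author's own statement) =====
-- stated objective: alternative
-- what changed: Instead of iterating every integer in [start, end] and popping present keys, B makes one pass over the dict's items and keeps those whose key is outside the range.
import Mathlib
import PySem

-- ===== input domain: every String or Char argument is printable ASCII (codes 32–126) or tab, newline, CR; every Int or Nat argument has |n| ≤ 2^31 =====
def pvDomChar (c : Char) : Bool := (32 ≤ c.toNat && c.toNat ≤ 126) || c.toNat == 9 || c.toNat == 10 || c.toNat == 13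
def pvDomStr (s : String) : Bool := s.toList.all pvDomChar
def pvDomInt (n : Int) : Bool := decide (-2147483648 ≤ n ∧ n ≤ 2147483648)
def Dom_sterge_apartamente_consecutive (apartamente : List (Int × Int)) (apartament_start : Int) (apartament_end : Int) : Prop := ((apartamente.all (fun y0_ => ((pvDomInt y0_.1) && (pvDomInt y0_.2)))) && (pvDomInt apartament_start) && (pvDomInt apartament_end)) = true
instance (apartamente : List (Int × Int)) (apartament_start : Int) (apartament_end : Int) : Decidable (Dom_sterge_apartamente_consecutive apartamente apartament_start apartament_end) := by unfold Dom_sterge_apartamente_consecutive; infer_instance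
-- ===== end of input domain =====

-- B replaces the loop over every integer in [start, end] by a single filtering pass over the dict's items.


-- ===== PORT A =====
-- 'for apartament in range(start, end+1): if apartament in new_apartamente: new_apartamente.pop(apartament)'
-- (pop on a key known to be present = Dict.erase); the input dict is the association list via Dict.ofList.
def sterge_apartamente_consecutive (apartamente : List (Int × Int)) (apartament_start : Int) (apartament_end : Int) : List (Int × Int) :=
  let new_apartamente := PySem.Dict.ofList apartamente
  ((PySem.List.pyRange apartament_start (apartament_end + 1) 1).foldl
    (fun d apartament => if d.contains apartament then d.erase apartament else d)
    new_apartamente).items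

-- ===== PORT B =====
-- '{k: v for k, v in apartamente.items() if not (apartament_start <= k <= apartament_end)}'
def sterge_apartamente_consecutive_alt (apartamente : List (Int × Int)) (apartament_start : Int) (apartament_end : Int) : List (Int × Int) :=
  (PySem.Dict.ofList apartamente).items.filter
    (fun kv => !(decide (apartament_start ≤ kv.1) && decide (kv.1 ≤ apartament_end)))

-- ===== PRECONDITION & SPEC =====
def Spec_sterge_apartamente_consecutive (apartamente : List (Int × Int)) (apartament_start : Int) (apartament_end : Int) (out : List (Int × Int)) : Prop := out = sterge_apartamente_consecutive_alt apartamente apartament_start apartament_end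
instance (apartamente : List (Int × Int)) (apartament_start : Int) (apartament_end : Int) (out : List (Int × Int)) : Decidable (Spec_sterge_apartamente_consecutive apartamente apartament_start apartament_end out) := by unfold Spec_sterge_apartamente_consecutive; infer_instance

-- ===== CLAIM (what is proved, stated in full; the proofs are below) =====
def Claim_equal_sterge_apartamente_consecutive : Prop := ∀ (apartamente : List (Int × Int)) (apartament_start : Int) (apartament_end : Int), Dom_sterge_apartamente_consecutive apartamente apartament_start apartament_end → Spec_sterge_apartamente_consecutive apartamente apartament_start apartament_end (sterge_apartamente_consecutive apartamente apartament_start apartament_end)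

-- ===== LEMMAS AND PROOFS =====

-- the contains-guarded erase of A's loop is just erase (erasing an absent key is a no-op)
theorem erase_guard (d : PySem.Dict Int Int) (k : Int) :
    (if d.contains k then d.erase k else d) = d.erase k := by
  by_cases h : d.contains k = true
  · rw [if_pos h]
  · rw [if_neg h]
    apply PySem.Dict.ext
    show d.items = List.filter (fun p => !p.1 == k) d.items
    symm
    rw [List.filter_eq_self]
    intro p hp
    simp only [PySem.Dict.contains, List.any_eq_true, not_exists] at h
    have hk : (p.1 == k) = false := by
      cases hbe : (p.1 == k)
      · rfl
      · exact absurd ⟨hp, hbe⟩ (h p)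
    simp [hk]

-- folding erase over a list of keys filters the items by non-membership of the key
theorem foldl_erase_items (l : List Int) (d : PySem.Dict Int Int) :
    (l.foldl (fun d k => d.erase k) d).items
      = d.items.filter (fun kv => decide (kv.1 ∉ l)) := by
  induction l generalizing d with
  | nil => simp
  | cons k l ih =>
      rw [List.foldl_cons, ih]
      show List.filter _ (List.filter (fun p => !p.1 == k) d.items) = _
      rw [List.filter_filter]
      apply List.filter_congr
      intro p _
      by_cases h1 : p.1 ∈ l <;> by_cases h2 : p.1 = k <;> simp [h1, h2]

theorem sterge_eq (apartamente : List (Int × Int)) (s e : Int) :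
    sterge_apartamente_consecutive apartamente s e
      = sterge_apartamente_consecutive_alt apartamente s e := by
  show ((PySem.List.pyRange s (e + 1) 1).foldl
      (fun d apartament => if d.contains apartament then d.erase apartament else d)
      (PySem.Dict.ofList apartamente)).items
    = sterge_apartamente_consecutive_alt apartamente s e
  unfold sterge_apartamente_consecutive_alt
  have hg : (PySem.List.pyRange s (e + 1) 1).foldl
        (fun d apartament => if d.contains apartament then d.erase apartament else d)
        (PySem.Dict.ofList apartamente)
      = (PySem.List.pyRange s (e + 1) 1).foldl (fun d k => d.erase k)
        (PySem.Dict.ofList apartamente) := by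
    apply PySem.List.foldl_congr_mem
    intro a x _
    exact erase_guard a x
  rw [hg, foldl_erase_items]
  apply List.filter_congr
  intro p _
  by_cases h1 : s ≤ p.1 <;> by_cases h2 : p.1 ≤ e <;>
    simp [PySem.List.mem_pyRange_one, h1, h2, Int.lt_add_one_iff]

-- ===== VERDICT (by name: the statement is the Claim_ definition above) =====
theorem sterge_apartamente_consecutive_spec : Claim_equal_sterge_apartamente_consecutive := by
  intro a s e _
  exact sterge_eq a s e
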